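-- pv_equiv track=rewrite | github.com/tsao100/Kanji-Convert | shp2kandat.py | jistoxy
-- ===== SOURCE A (Python) =====
-- ZKC = [
--     0x2120, 0x217F,
--     0x2220, 0x222F,
--     0x232F, 0x233A,
--     0x2340, 0x235B,
--     0x2360, 0x237B,
--     0x2420, 0x2474,
--     0x2520, 0x2577,
--     0x2620, 0x2639,
--     0x2640, 0x2659,
--     0x2720, 0x2742,
--     0x2750, 0x2772,
-- ]
--
-- def jistoxy(jiscode: int) -> int:
--     hcd = (jiscode >> 8) & 0xFF
--     lcd =  jiscode       & 0xFF
--     ktype = 0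
--     if 0x2120 < jiscode < 0x277E: ktype = 1
--     if 0x30 <= hcd <= 0x4F:       ktype = 2
--     if 0x50 <= hcd <= 0x75:       ktype = 3
--     if 0x7620 < jiscode < 0x76D0: ktype = 4
--     if ktype == 1:
--         kcbase = 0
--         for i in range(1, len(ZKC), 2):
--             if ZKC[i-1] < jiscode < ZKC[i]:
--                 return jiscode - ZKC[i-1] + kcbase
--             kcbase += ZKC[i] - ZKC[i-1] - 1
--         return 0
--     elif ktype == 2:
--         if not (0x21 <= lcd <= 0x7E): return 0
--         return (hcd-0x30)*94 + (lcd-0x20) + 453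
--     elif ktype == 3:
--         if not (0x21 <= lcd <= 0x7E): return 0
--         return (hcd-0x50)*94 + (lcd-0x20) + 4000
--     elif ktype == 4:
--         return jiscode - 0x7620 + 3518
--     return 0
-- ===== SOURCE B (Python) =====
-- # Closed-form rewrite: the ZKC table and its scan are gone entirely; the kanji
-- # region is dispatched per high byte with a constant-folded arithmetic formula
-- # per row, and the ktype cascade becomes a reversed-priority early-return chain.
--
-- def jistoxy(jiscode: int) -> int:
--     hcd = (jiscode >> 8) & 0xFF
--     lcd = jiscode & 0xFF
--     if 0x7620 < jiscode < 0x76D0: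
--         return jiscode - 0x7620 + 3518
--     if 0x50 <= hcd <= 0x75:
--         return (hcd - 0x50) * 94 + (lcd - 0x20) + 4000 if 0x21 <= lcd <= 0x7E else 0
--     if 0x30 <= hcd <= 0x4F:
--         return (hcd - 0x30) * 94 + (lcd - 0x20) + 453 if 0x21 <= lcd <= 0x7E else 0
--     if not (0x2120 < jiscode < 0x277E):
--         return 0
--     # ZKC region: closed form per high byte (no table, no scan)
--     if hcd == 0x21:
--         return lcd - 0x20 if lcd <= 0x7E else 0
--     if hcd == 0x22:
--         return lcd + 62 if 0x21 <= lcd <= 0x2E else 0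
--     if hcd == 0x23:
--         if 0x30 <= lcd <= 0x39: return lcd + 61
--         if 0x41 <= lcd <= 0x5A: return lcd + 54
--         if 0x61 <= lcd <= 0x7A: return lcd + 48
--         return 0
--     if hcd == 0x24:
--         return lcd + 138 if 0x21 <= lcd <= 0x73 else 0
--     if hcd == 0x25:
--         return lcd + 221 if 0x21 <= lcd <= 0x76 else 0
--     if hcd == 0x26:
--         if 0x21 <= lcd <= 0x38: return lcd + 307
--         if 0x41 <= lcd <= 0x58: return lcd + 299
--         return 0
--     # hcd == 0x27 (the only remaining high byte inside the region)
--     if 0x21 <= lcd <= 0x41: return lcd + 355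
--     if 0x51 <= lcd <= 0x71: return lcd + 340
--     return 0
-- ===== Notes on version B (the rewrite author's own statement) =====
-- stated objective: alternative
-- what changed: Deletes the ZKC bound list and its running-kcbase scan entirely: the kanji region is dispatched on the high byte with one constant-folded closed-form arithmetic formula per row over the low byte, and the sequential overriding ktype assignments become a reversed-priority early-return chain with no ktype variable.
import Mathlib
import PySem

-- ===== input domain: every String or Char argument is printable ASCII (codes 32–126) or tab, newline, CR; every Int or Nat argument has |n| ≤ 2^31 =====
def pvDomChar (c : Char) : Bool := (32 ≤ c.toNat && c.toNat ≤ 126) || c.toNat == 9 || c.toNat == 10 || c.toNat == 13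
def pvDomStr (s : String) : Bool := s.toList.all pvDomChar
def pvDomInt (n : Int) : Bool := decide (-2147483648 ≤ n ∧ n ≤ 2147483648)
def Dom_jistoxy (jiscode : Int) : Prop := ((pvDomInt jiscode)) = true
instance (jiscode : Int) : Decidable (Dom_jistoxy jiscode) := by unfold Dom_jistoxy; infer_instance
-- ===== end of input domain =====

-- B removes the ZKC table and its running-kcbase scan: the kanji region is a
-- per-high-byte closed-form formula on the low byte, and the overriding ktype
-- assignments become a reversed-priority early-return chain (objective: alternative).

-- ===== PORT A =====
def ZKC : List Int :=
  [0x2120, 0x217F, 0x2220, 0x222F, 0x232F, 0x233A, 0x2340, 0x235B, 0x2360, 0x237B,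
   0x2420, 0x2474, 0x2520, 0x2577, 0x2620, 0x2639, 0x2640, 0x2659, 0x2720, 0x2742,
   0x2750, 0x2772]

-- for i in range(1, len(ZKC), 2): early return ⇒ structural recursion over the
-- index list with the kcbase accumulator.  ZKC indices are literals in range,
-- so `.getD 0` never fires its default.
def jistoxyLoop (jiscode : Int) : List Int → Int → Int
  | [], _ => 0
  | i :: rest, kcbase =>
    let zlo := (PySem.List.pyGet? ZKC (i - 1)).getD 0
    let zhi := (PySem.List.pyGet? ZKC i).getD 0
    if zlo < jiscode ∧ jiscode < zhi then jiscode - zlo + kcbase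
    else jistoxyLoop jiscode rest (kcbase + (zhi - zlo - 1))

def jistoxy (jiscode : Int) : Int :=
  let hcd := PySem.Int.band (jiscode >>> 8) 0xFF
  let lcd := PySem.Int.band jiscode 0xFF
  let ktype : Int := 0
  let ktype := if 0x2120 < jiscode ∧ jiscode < 0x277E then 1 else ktype
  let ktype := if 0x30 ≤ hcd ∧ hcd ≤ 0x4F then 2 else ktype
  let ktype := if 0x50 ≤ hcd ∧ hcd ≤ 0x75 then 3 else ktype
  let ktype := if 0x7620 < jiscode ∧ jiscode < 0x76D0 then 4 else ktype
  if ktype = 1 then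
    jistoxyLoop jiscode (PySem.List.pyRange 1 (ZKC.length : Int) 2) 0
  else if ktype = 2 then
    if ¬(0x21 ≤ lcd ∧ lcd ≤ 0x7E) then 0
    else (hcd - 0x30) * 94 + (lcd - 0x20) + 453
  else if ktype = 3 then
    if ¬(0x21 ≤ lcd ∧ lcd ≤ 0x7E) then 0
    else (hcd - 0x50) * 94 + (lcd - 0x20) + 4000
  else if ktype = 4 then
    jiscode - 0x7620 + 3518
  else 0

-- ===== PORT B =====
def jistoxy_alt (jiscode : Int) : Int :=
  let hcd := PySem.Int.band (jiscode >>> 8) 0xFF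
  let lcd := PySem.Int.band jiscode 0xFF
  if 0x7620 < jiscode ∧ jiscode < 0x76D0 then
    jiscode - 0x7620 + 3518
  else if 0x50 ≤ hcd ∧ hcd ≤ 0x75 then
    if 0x21 ≤ lcd ∧ lcd ≤ 0x7E then (hcd - 0x50) * 94 + (lcd - 0x20) + 4000 else 0
  else if 0x30 ≤ hcd ∧ hcd ≤ 0x4F then
    if 0x21 ≤ lcd ∧ lcd ≤ 0x7E then (hcd - 0x30) * 94 + (lcd - 0x20) + 453 else 0
  else if ¬(0x2120 < jiscode ∧ jiscode < 0x277E) then 0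
  -- ZKC region: closed form per high byte (no table, no scan)
  else if hcd = 0x21 then
    if lcd ≤ 0x7E then lcd - 0x20 else 0
  else if hcd = 0x22 then
    if 0x21 ≤ lcd ∧ lcd ≤ 0x2E then lcd + 62 else 0
  else if hcd = 0x23 then
    if 0x30 ≤ lcd ∧ lcd ≤ 0x39 then lcd + 61
    else if 0x41 ≤ lcd ∧ lcd ≤ 0x5A then lcd + 54
    else if 0x61 ≤ lcd ∧ lcd ≤ 0x7A then lcd + 48
    else 0
  else if hcd = 0x24 then
    if 0x21 ≤ lcd ∧ lcd ≤ 0x73 then lcd + 138 else 0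
  else if hcd = 0x25 then
    if 0x21 ≤ lcd ∧ lcd ≤ 0x76 then lcd + 221 else 0
  else if hcd = 0x26 then
    if 0x21 ≤ lcd ∧ lcd ≤ 0x38 then lcd + 307
    else if 0x41 ≤ lcd ∧ lcd ≤ 0x58 then lcd + 299
    else 0
  -- hcd == 0x27 (the only remaining high byte inside the region)
  else if 0x21 ≤ lcd ∧ lcd ≤ 0x41 then lcd + 355
  else if 0x51 ≤ lcd ∧ lcd ≤ 0x71 then lcd + 340
  else 0

-- ===== PRECONDITION & SPEC =====
def Spec_jistoxy (jiscode : Int) (out : Int) : Prop := out = jistoxy_alt jiscode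
instance (jiscode : Int) (out : Int) : Decidable (Spec_jistoxy jiscode out) := by unfold Spec_jistoxy; infer_instance

-- ===== CLAIM (what is proved, stated in full; the proofs are below) =====
def Claim_equal_jistoxy : Prop := ∀ (jiscode : Int), Dom_jistoxy jiscode → Spec_jistoxy jiscode (jistoxy jiscode)

-- ===== LEMMAS AND PROOFS =====

-- Inside the ZKC region (0x2120 < j < 0x277E, i.e. j = 8481..10109) the two
-- ports agree; the region is finite, so this is checked by kernel evaluation.
set_option maxHeartbeats 4000000 in
set_option maxRecDepth 100000 in
theorem region_eq :
    (List.range 1629).all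
      (fun k => jistoxy (8481 + (k : Int)) == jistoxy_alt (8481 + (k : Int))) = true := by
  decide

-- ===== VERDICT (by name: the statement is the Claim_ definition above) =====
theorem jistoxy_spec : Claim_equal_jistoxy := by
  intro j _
  show jistoxy j = jistoxy_alt j
  by_cases hreg : (0x2120:Int) < j ∧ j < 0x277E
  · -- finite region: instantiate region_eq at k = j - 8481
    have hall := List.all_eq_true.mp region_eq ((j - 8481).toNat)
      (by simp only [List.mem_range]; omega)
    rw [beq_iff_eq] at hall
    have hj : (8481 : Int) + ((j - 8481).toNat : Int) = j := by omega
    rwa [hj] at hall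
  · -- outside the region both sides are the same closed formulas on hcd/lcd
    simp only [jistoxy, jistoxy_alt]
    generalize PySem.Int.band (j >>> (8:Int)) 0xFF = hcd
    generalize PySem.Int.band j 0xFF = lcd
    split_ifs <;> first | rfl | omega
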